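-- pv_equiv track=rewrite | github.com/Laksh-Mendpara/NLU-Assignment-2 | word2vec/training.py | count_training_examples
-- ===== SOURCE A (Python) =====
-- def count_training_examples(encoded_sentences: list[list[int]], window_size: int, model_type: str) -> int:
--     """Count the number of examples produced by the corpus."""
--     total = 0
--     for sentence in encoded_sentences:
--         for position in range(len(sentence)):
--             left = max(0, position - window_size)
--             right = min(len(sentence), position + window_size + 1)
--             context_len = (position - left) + (right - position - 1)
--             if context_len <= 0:
--                 continue
--             total += context_len if model_type == "skipgram" else 1
--     return total
-- ===== SOURCE B (Python) =====
-- def count_training_examples(encoded_sentences: list[list[int]], window_size: int, model_type: str) -> int: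
--     """Count examples with O(1) arithmetic per sentence instead of scanning positions."""
--     if window_size <= 0:
--         return 0
--     w = window_size
--     skipgram = (model_type == "skipgram")
--     total = 0
--     for sentence in encoded_sentences:
--         n = len(sentence)
--         if n < 2:
--             continue
--         if skipgram:
--             m = min(w, n - 1)
--             total += m * (m + 1) + 2 * (n - 1 - m) * w
--         else:
--             total += n
--     return total
-- ===== Notes on version B (the rewrite author's own statement) =====
-- stated objective: faster
-- what changed: Replaces the per-position inner loop over each sentence with a closed-form arithmetic count per sentence (m*(m+1)+2*(n-1-m)*w for skipgram with m=min(w,n-1), n for cbow), so cost drops from O(total tokens) to O(number of sentences).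
import Mathlib
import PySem

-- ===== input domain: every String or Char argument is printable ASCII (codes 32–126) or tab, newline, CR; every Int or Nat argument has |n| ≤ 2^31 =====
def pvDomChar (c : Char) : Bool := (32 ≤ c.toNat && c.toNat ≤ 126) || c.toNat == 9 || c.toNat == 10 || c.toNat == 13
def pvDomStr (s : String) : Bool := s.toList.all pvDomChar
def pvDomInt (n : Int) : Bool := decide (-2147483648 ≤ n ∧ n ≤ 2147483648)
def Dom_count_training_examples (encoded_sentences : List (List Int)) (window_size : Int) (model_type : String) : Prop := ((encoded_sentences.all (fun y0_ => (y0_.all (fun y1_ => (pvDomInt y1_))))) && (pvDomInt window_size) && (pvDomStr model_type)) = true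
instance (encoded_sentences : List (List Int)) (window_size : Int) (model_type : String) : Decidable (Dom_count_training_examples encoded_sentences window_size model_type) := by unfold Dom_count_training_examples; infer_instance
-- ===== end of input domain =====

-- B replaces A's per-position inner scan with closed-form arithmetic per sentence (objective: faster).

-- ===== PORT A =====
def count_training_examples (encoded_sentences : List (List Int)) (window_size : Int) (model_type : String) : Int :=
  encoded_sentences.foldl (fun total sentence =>
    (PySem.List.pyRange 0 (sentence.length : Int) 1).foldl (fun t position =>
      let left := max 0 (position - window_size)
      let right := min ((sentence.length : Int)) (position + window_size + 1)
      let context_len := (position - left) + (right - position - 1)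
      if context_len ≤ 0 then t
      else t + (if model_type == "skipgram" then context_len else 1)) total) 0

-- ===== PORT B =====
def count_training_examples_alt (encoded_sentences : List (List Int)) (window_size : Int) (model_type : String) : Int :=
  if window_size ≤ 0 then 0
  else
    encoded_sentences.foldl (fun total s =>
      let n : Int := (s.length : Int)
      if n < 2 then total
      else if model_type == "skipgram" then
        let m := min window_size (n - 1)
        total + (m * (m + 1) + 2 * (n - 1 - m) * window_size)
      else total + n) 0

-- ===== PRECONDITION & SPEC =====
def Spec_count_training_examples (encoded_sentences : List (List Int)) (window_size : Int) (model_type : String) (out : Int) : Prop := out = count_training_examples_alt encoded_sentences window_size model_type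
instance (encoded_sentences : List (List Int)) (window_size : Int) (model_type : String) (out : Int) : Decidable (Spec_count_training_examples encoded_sentences window_size model_type out) := by unfold Spec_count_training_examples; infer_instance

-- ===== CLAIM (what is proved, stated in full; the proofs are below) =====
def Claim_equal_count_training_examples : Prop := ∀ (encoded_sentences : List (List Int)) (window_size : Int) (model_type : String), Dom_count_training_examples encoded_sentences window_size model_type → Spec_count_training_examples encoded_sentences window_size model_type (count_training_examples encoded_sentences window_size model_type)

-- ===== LEMMAS AND PROOFS =====

def sMin (w : Int) : Nat → Int
  | 0 => 0
  | j+1 => sMin w j + min (j : Int) w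

theorem sMin_closed (w : Int) (hw : 1 ≤ w) (j : Nat) :
    2 * sMin w j =
      (min w ((j:Int) - 1)) * ((min w ((j:Int) - 1)) + 1)
        + 2 * ((j:Int) - 1 - min w ((j:Int) - 1)) * w := by
  induction j with
  | zero =>
    have h : min w (((0:Nat):Int) - 1) = -1 := by omega
    rw [h]; simp [sMin]
  | succ j ih =>
    have e : sMin w (j+1) = sMin w j + min (j:Int) w := rfl
    by_cases h : (j:Int) ≤ w
    · have h1 : min w ((j:Int) - 1) = (j:Int) - 1 := by omega
      have h2 : min w (((j+1:Nat):Int) - 1) = (j:Int) := by push_cast; omega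
      have h3 : min (j:Int) w = (j:Int) := by omega
      rw [e, h3, h2]
      rw [h1] at ih
      push_cast
      linear_combination ih
    · have h1 : min w ((j:Int) - 1) = w := by omega
      have h2 : min w (((j+1:Nat):Int) - 1) = w := by push_cast; omega
      have h3 : min (j:Int) w = w := by omega
      rw [e, h3, h2]
      rw [h1] at ih
      push_cast
      linear_combination ih

def innerStepA (w : Int) (n : Int) (mt : String) (t p : Int) : Int :=
  let left := max 0 (p - w)
  let right := min n (p + w + 1)
  let context_len := (p - left) + (right - p - 1)
  if context_len ≤ 0 then t
  else t + (if mt == "skipgram" then context_len else 1)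

theorem innerA_nonpos (w : Int) (hw : w ≤ 0) (n : Int) (mt : String) (j : Nat) (t : Int) :
    (PySem.List.pyRange 0 (j:Int) 1).foldl (innerStepA w n mt) t = t := by
  induction j generalizing t with
  | zero => simp [PySem.List.pyRange_one_eq_nil]
  | succ j ih =>
    have hcast : ((j+1:Nat):Int) = (j:Int) + 1 := by push_cast; ring
    rw [hcast, PySem.List.pyRange_one_succ_right (by positivity), List.foldl_append]
    rw [ih]
    simp only [List.foldl, innerStepA]
    rw [if_pos (by omega)]

theorem innerA_cbow (w : Int) (hw : 1 ≤ w) (n : Nat) (hn : 2 ≤ n) (mt : String)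
    (hmt : (mt == "skipgram") = false) (j : Nat) (hj : j ≤ n) (t : Int) :
    (PySem.List.pyRange 0 (j:Int) 1).foldl (innerStepA w (n:Int) mt) t = t + (j:Int) := by
  induction j generalizing t with
  | zero => simp [PySem.List.pyRange_one_eq_nil]
  | succ j ih =>
    have hcast : ((j+1:Nat):Int) = (j:Int) + 1 := by push_cast; ring
    rw [hcast, PySem.List.pyRange_one_succ_right (by positivity), List.foldl_append]
    rw [ih (by omega)]
    simp only [List.foldl, innerStepA]
    rw [if_neg (by omega), hmt]
    push_cast; ring

theorem innerA_skip (w : Int) (hw : 1 ≤ w) (n : Nat) (hn : 2 ≤ n) (mt : String)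
    (hmt : (mt == "skipgram") = true) (j : Nat) (hj : j ≤ n) (t : Int) :
    (PySem.List.pyRange 0 (j:Int) 1).foldl (innerStepA w (n:Int) mt) t
      = t + sMin w j + (sMin w n - sMin w (n - j)) := by
  induction j generalizing t with
  | zero => simp [PySem.List.pyRange_one_eq_nil, sMin]
  | succ j ih =>
    have hcast : ((j+1:Nat):Int) = (j:Int) + 1 := by push_cast; ring
    rw [hcast, PySem.List.pyRange_one_succ_right (by positivity), List.foldl_append]
    rw [ih (by omega)]
    simp only [List.foldl, innerStepA]
    rw [if_neg (by omega), hmt, if_pos rfl]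
    have e1 : sMin w (j+1) = sMin w j + min (j:Int) w := rfl
    have e2 : n - j = (n - (j+1)) + 1 := by omega
    have e3 : sMin w (n - j) = sMin w (n - (j+1)) + min ((n - (j+1) : Nat) : Int) w := by
      rw [e2]; rfl
    have e4 : ((n - (j+1) : Nat) : Int) = (n:Int) - (j:Int) - 1 := by push_cast [Nat.cast_sub (by omega : j+1 ≤ n)]; ring
    have e5 : (j:Int) - max 0 ((j:Int) - w) + (min (n:Int) ((j:Int) + w + 1) - (j:Int) - 1)
        = min (j:Int) w + min ((n:Int) - (j:Int) - 1) w := by omega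
    rw [e1, e3, e4]
    linarith [e5]

theorem sentence_eq (w : Int) (hw : 1 ≤ w) (mt : String) (s : List Int) (t : Int) :
    (PySem.List.pyRange 0 (s.length:Int) 1).foldl (innerStepA w (s.length:Int) mt) t
      = (if (s.length:Int) < 2 then t
         else if mt == "skipgram" then
           t + (min w ((s.length:Int)-1) * (min w ((s.length:Int)-1) + 1)
                + 2*((s.length:Int)-1-min w ((s.length:Int)-1))*w)
         else t + (s.length:Int)) := by
  set n := s.length with hn
  match hm : n with
  | 0 => simp [PySem.List.pyRange_one_eq_nil]
  | 1 =>
    rw [if_pos (by norm_num)]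
    have h01 : PySem.List.pyRange 0 ((1:Nat):Int) 1 = [0] := by
      simpa using PySem.List.pyRange_one_singleton 0
    rw [h01]
    simp only [List.foldl, innerStepA]
    rw [if_pos (by omega)]
  | (k+2) =>
    rw [if_neg (by push_cast; omega)]
    rcases hb : (mt == "skipgram") with _ | _
    · rw [innerA_cbow w hw (k+2) (by omega) mt hb (k+2) le_rfl t]
      norm_num
    · rw [innerA_skip w hw (k+2) (by omega) mt hb (k+2) le_rfl t]
      have h0 : sMin w (k+2-(k+2)) = 0 := by norm_num [sMin]
      have hc := sMin_closed w hw (k+2)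
      rw [h0]
      rw [if_pos rfl]
      linarith

theorem outer_nonpos (w : Int) (hw : w ≤ 0) (mt : String) (es : List (List Int)) (t : Int) :
    es.foldl (fun total s =>
      (PySem.List.pyRange 0 (s.length:Int) 1).foldl (innerStepA w (s.length:Int) mt) total) t = t := by
  induction es generalizing t with
  | nil => rfl
  | cons s es ih =>
    simp only [List.foldl]
    rw [innerA_nonpos w hw _ mt s.length t, ih]

theorem outer_pos (w : Int) (hw : 1 ≤ w) (mt : String) (es : List (List Int)) (t : Int) :
    es.foldl (fun total s =>
      (PySem.List.pyRange 0 (s.length:Int) 1).foldl (innerStepA w (s.length:Int) mt) total) t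
    = es.foldl (fun total s =>
        let n : Int := (s.length : Int)
        if n < 2 then total
        else if mt == "skipgram" then
          let m := min w (n - 1)
          total + (m * (m + 1) + 2 * (n - 1 - m) * w)
        else total + n) t := by
  induction es generalizing t with
  | nil => rfl
  | cons s es ih =>
    simp only [List.foldl]
    rw [sentence_eq w hw mt s t, ih]


-- ===== VERDICT (by name: the statement is the Claim_ definition above) =====
theorem count_training_examples_spec : Claim_equal_count_training_examples := by
  intro es w mt _
  unfold Spec_count_training_examples
  have hA : count_training_examples es w mt
      = es.foldl (fun total s =>
          (PySem.List.pyRange 0 (s.length:Int) 1).foldl (innerStepA w (s.length:Int) mt) total) 0 := rfl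
  by_cases hw : w ≤ 0
  · rw [hA, outer_nonpos w hw mt es 0]
    simp [count_training_examples_alt, hw]
  · have hw1 : 1 ≤ w := by omega
    rw [hA, outer_pos w hw1 mt es 0]
    simp only [count_training_examples_alt, if_neg hw]
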